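-- pv_equiv track=rewrite | github.com/NeighbourWise-AI/neighbourwise.ai_version1 | Airflow/util/neighbourwise_rag.py | _char_chunk
-- ===== SOURCE A (Python) =====
-- from typing import List, Optional
--
-- def _char_chunk(text: str, chunk_size: int, overlap: int) -> List[str]:
--     """Character-window chunking with whitespace-aware splitting."""
--     chunks = []
--     start = 0
--     while start < len(text):
--         end = start + chunk_size
--         if end < len(text):
--             # Try to break at whitespace
--             brk = end
--             while brk > start and not text[brk].isspace():
--                 brk -= 1
--             if brk > start:
--                 end = brk
--         chunk = text[start:end].strip()
--         if chunk:
--             chunks.append(chunk)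
--         start = end - overlap if overlap < (end - start) else end
--     return chunks
-- ===== SOURCE B (Python) =====
-- from typing import List
--
-- def _char_chunk(text: str, chunk_size: int, overlap: int) -> List[str]:
--     """Character-window chunking with whitespace-aware splitting.
--
--     One-pass variant: the whitespace positions are collected up front and a
--     monotone pointer into that list replaces A's backward character scan.
--     """
--     ws = [i for i, c in enumerate(text) if c.isspace()]
--     m = len(ws)
--     n = len(text)
--     chunks = []
--     start = 0
--     j = 0
--     while start < n:
--         end = start + chunk_size
--         # advance the pointer past every whitespace index <= end (end grows monotonically)
--         while j < m and ws[j] <= end: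
--             j += 1
--         if end < n and j > 0 and ws[j - 1] > start:
--             end = ws[j - 1]
--         chunk = text[start:end].strip()
--         if chunk:
--             chunks.append(chunk)
--         start = end - overlap if overlap < (end - start) else end
--     return chunks
-- ===== Notes on version B (the rewrite author's own statement) =====
-- stated objective: alternative
-- what changed: A's per-chunk backward character scan for a whitespace break is replaced by a whitespace-index list built in one upfront pass and consumed by a monotone pointer, so no character is re-examined across chunks.
import Mathlib
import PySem

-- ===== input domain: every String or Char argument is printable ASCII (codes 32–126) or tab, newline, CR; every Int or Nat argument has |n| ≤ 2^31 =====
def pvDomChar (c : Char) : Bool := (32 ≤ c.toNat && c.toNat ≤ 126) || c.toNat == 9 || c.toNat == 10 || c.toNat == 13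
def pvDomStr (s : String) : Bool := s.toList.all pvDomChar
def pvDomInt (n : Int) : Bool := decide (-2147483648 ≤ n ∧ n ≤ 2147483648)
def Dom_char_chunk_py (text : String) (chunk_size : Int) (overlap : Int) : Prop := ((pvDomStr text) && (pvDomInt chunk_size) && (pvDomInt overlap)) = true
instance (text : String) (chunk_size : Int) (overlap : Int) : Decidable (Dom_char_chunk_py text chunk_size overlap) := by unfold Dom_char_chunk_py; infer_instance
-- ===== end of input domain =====

-- B replaces A's per-chunk backward character scan with a precomputed list of whitespace
-- positions walked once by a monotone pointer (objective: alternative, no re-scanning of characters).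

-- ===== PORT A =====
-- inner `while brk > start and not text[brk].isspace(): brk -= 1`
def pyBrkScan (t : List Char) (start : Int) (brk : Int) : Int :=
  if _h : start < brk then
    match PySem.List.pyGet? t brk with
    | some c => if PySem.Chars.isspace c then brk else pyBrkScan t start (brk - 1)
    | none => brk   -- unreachable in any run A performs: Python would raise IndexError
  else brk
termination_by (brk - start).toNat
decreasing_by omega

-- outer `while start < len(text): ...` (fuel bounds the iteration count; A diverges outside Pre_)
def chunkLoopA (t : List Char) (cs ov : Int) : Nat → Int → List String → List String
  | 0, _, acc => acc
  | fuel+1, start, acc =>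
    if start < (t.length : Int) then
      let end0 := start + cs
      let end1 := if end0 < (t.length : Int) then
          let brk := pyBrkScan t start end0
          if start < brk then brk else end0
        else end0
      let chunk := PySem.Chars.strip (PySem.List.slice t (some start) (some end1))
      let acc' := if chunk ≠ [] then acc ++ [String.ofList chunk] else acc
      let start' := if ov < end1 - start then end1 - ov else end1
      chunkLoopA t cs ov fuel start' acc'
    else acc

def char_chunk_py (text : String) (chunk_size : Int) (overlap : Int) : List String :=
  let t := text.toList
  chunkLoopA t chunk_size overlap (t.length + 1) 0 []

-- ===== PORT B =====
-- `ws = [i for i, c in enumerate(text) if c.isspace()]`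
def pyWsIdx (t : List Char) : List Int :=
  ((PySem.List.enumerate t 0).filter (fun p => PySem.Chars.isspace p.2)).map (fun p => p.1)

-- `while j < m and ws[j] <= end: j += 1`
def pyAdvance (ws : List Int) (e : Int) (j : Nat) : Nat :=
  if h : j < ws.length then
    if ws[j] ≤ e then pyAdvance ws e (j + 1) else j
  else j
termination_by ws.length - j
decreasing_by omega

def chunkLoopB (t : List Char) (ws : List Int) (cs ov : Int) : Nat → Int → Nat → List String → List String
  | 0, _, _, acc => acc
  | fuel+1, start, j, acc =>
    if start < (t.length : Int) then
      let end0 := start + cs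
      let j' := pyAdvance ws end0 j
      let w := ws.getD (j' - 1) 0      -- ws[j'-1]; only read under j' > 0, where it is in range
      let end1 := if end0 < (t.length : Int) ∧ 0 < j' ∧ start < w then w else end0
      let chunk := PySem.Chars.strip (PySem.List.slice t (some start) (some end1))
      let acc' := if chunk ≠ [] then acc ++ [String.ofList chunk] else acc
      let start' := if ov < end1 - start then end1 - ov else end1
      chunkLoopB t ws cs ov fuel start' j' acc'
    else acc

def char_chunk_py_alt (text : String) (chunk_size : Int) (overlap : Int) : List String :=
  let t := text.toList
  chunkLoopB t (pyWsIdx t) chunk_size overlap (t.length + 1) 0 0 []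

-- ===== PRECONDITION & SPEC =====
-- Pre_ excludes exactly the inputs on which A never returns: for non-empty text with
-- chunk_size ≤ 0 and overlap ≥ chunk_size, `start` never increases and A loops forever.
def Pre_char_chunk_py (text : String) (chunk_size : Int) (overlap : Int) : Prop :=
  text = "" ∨ 1 ≤ chunk_size ∨ overlap < chunk_size
instance (text : String) (chunk_size : Int) (overlap : Int) : Decidable (Pre_char_chunk_py text chunk_size overlap) := by unfold Pre_char_chunk_py; infer_instance

def pvWitness_char_chunk_py : String × Int × Int := ("hello world, how are you?", 7, 2)

def Spec_char_chunk_py (text : String) (chunk_size : Int) (overlap : Int) (out : List String) : Prop := out = char_chunk_py_alt text chunk_size overlap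
instance (text : String) (chunk_size : Int) (overlap : Int) (out : List String) : Decidable (Spec_char_chunk_py text chunk_size overlap out) := by unfold Spec_char_chunk_py; infer_instance

-- ===== CLAIM (what is proved, stated in full; the proofs are below) =====
def Claim_equal_char_chunk_py : Prop := ∀ (text : String) (chunk_size : Int) (overlap : Int), Dom_char_chunk_py text chunk_size overlap → Pre_char_chunk_py text chunk_size overlap → Spec_char_chunk_py text chunk_size overlap (char_chunk_py text chunk_size overlap)

-- ===== LEMMAS AND PROOFS =====

-- the maximal whitespace index in (start, e], as an Option (proof-side characterisation)
def wsMax (ws : List Int) (start e : Int) : Option Int :=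
  (ws.filter (fun w => decide (start < w ∧ w ≤ e))).getLast?

theorem mem_pyWsIdx (t : List Char) (w : Int) :
    w ∈ pyWsIdx t ↔ ∃ k : Nat, ∃ _h : k < t.length, w = (k : Int) ∧ PySem.Chars.isspace t[k] := by
  simp only [pyWsIdx, List.mem_map, List.mem_filter, PySem.List.mem_enumerate_iff]
  constructor
  · rintro ⟨p, ⟨⟨k, hk, rfl⟩, hsp⟩, rfl⟩
    exact ⟨k, hk, by simpa using hsp⟩
  · rintro ⟨k, hk, rfl, hsp⟩
    exact ⟨((k : Int), t[k]), ⟨⟨k, hk, by simp⟩, hsp⟩, rfl⟩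
theorem pairwise_pyWsIdx (t : List Char) : (pyWsIdx t).Pairwise (· < ·) := by
  have h := PySem.List.pairwise_lt_enumerate t 0
  exact List.Pairwise.map _ (by intro a b hab; exact hab) (h.filter _)
theorem sorted_filter_getLast (l : List Int) (p : Int → Bool) (x : Int)
    (hs : l.Pairwise (· < ·)) (hm : x ∈ l) (hx : p x = true)
    (hmax : ∀ y ∈ l, p y = true → y ≤ x) : (l.filter p).getLast? = some x := by
  induction l with
  | nil => cases hm
  | cons a l ih =>
    rcases List.mem_cons.1 hm with rfl | hm'
    · -- x is the head; every later element is > x, so filter of tail rejects all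
      have htail : l.filter p = [] := by
        apply List.filter_eq_nil_iff.2
        intro y hy hpy
        have h1 : x < y := (List.pairwise_cons.1 hs).1 y hy
        have h2 : y ≤ x := hmax y (List.mem_cons_of_mem _ hy) hpy
        omega
      simp [hx, htail]
    · have ih' := ih hs.of_cons hm' (fun y hy hpy => hmax y (List.mem_cons_of_mem _ hy) hpy)
      rw [List.filter_cons]
      split
      · rw [List.getLast?_cons, ih']
        simp
      · exact ih'
theorem pyAdvance_spec (ws : List Int) (e : Int) (j : Nat)
    (hj : j ≤ ws.length) (hpre : ∀ k (_h : k < ws.length), k < j → ws[k] ≤ e) :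
    j ≤ pyAdvance ws e j ∧ pyAdvance ws e j ≤ ws.length ∧
    (∀ k (_h : k < ws.length), k < pyAdvance ws e j → ws[k] ≤ e) ∧
    (∀ _h : pyAdvance ws e j < ws.length, e < ws[pyAdvance ws e j]) := by
  fun_induction pyAdvance ws e j with
  | case1 j h hle ih =>
    have := ih (by omega) (by
      intro k hk hkj
      rcases Nat.lt_succ_iff_lt_or_eq.1 hkj with h' | rfl
      · exact hpre k hk h'
      · exact hle)
    exact ⟨by omega, this.2.1, this.2.2.1, this.2.2.2⟩
  | case2 j h hle => exact ⟨le_rfl, by omega, fun k hk hkj => hpre k hk hkj, fun _ => by omega⟩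
  | case3 j h => exact ⟨le_rfl, by omega, fun k hk hkj => hpre k hk hkj, fun h' => absurd h' h⟩
theorem pyGet?_of_range (t : List Char) (e : Int) (h0 : 0 ≤ e) (h1 : e < (t.length : Int)) :
    PySem.List.pyGet? t e = some (t[e.toNat]'(by omega)) := by
  obtain ⟨n, rfl⟩ : ∃ n : Nat, e = (n : Int) := ⟨e.toNat, by omega⟩
  rw [PySem.List.pyGet?_natCast]
  simp

theorem pyBrkScan_eq (t : List Char) (start e : Int)
    (hs : 0 ≤ start) (hlt : start < e) (he : e < (t.length : Int)) :
    pyBrkScan t start e = (wsMax (pyWsIdx t) start e).getD start := by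
  induction hn : (e - start).toNat using Nat.strong_induction_on generalizing e with
  | _ n ih =>
  rw [pyBrkScan, dif_pos hlt, pyGet?_of_range t e (by omega) he]
  dsimp only
  by_cases hsp : PySem.Chars.isspace (t[e.toNat]'(by omega)) = true
  · rw [if_pos hsp]
    have hmem : e ∈ pyWsIdx t := (mem_pyWsIdx t e).2 ⟨e.toNat, by omega, by omega, by
      convert hsp using 2⟩
    have : wsMax (pyWsIdx t) start e = some e := by
      apply sorted_filter_getLast _ _ _ (pairwise_pyWsIdx t) hmem (by simp; omega)
      intro y _ hy; simp at hy; omega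
    rw [this]; rfl
  · rw [if_neg hsp]
    have hfc : wsMax (pyWsIdx t) start e = wsMax (pyWsIdx t) start (e - 1) := by
      unfold wsMax
      congr 1
      apply List.filter_congr
      intro w hw
      rcases (mem_pyWsIdx t w).1 hw with ⟨k, hk, rfl, hks⟩
      have hne : (k : Int) ≠ e := by
        intro hke
        have : k = e.toNat := by omega
        subst this
        exact hsp hks
      simp only [decide_eq_decide]
      omega
    rw [hfc]
    by_cases hse : start < e - 1
    · exact ih (e - 1 - start).toNat (by omega) (e-1) hse (by omega) rfl
    · -- e - 1 ≤ start, i.e. e = start + 1: scan returns start via one more unfold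
      have he1 : e - 1 = start := by omega
      rw [he1, pyBrkScan, dif_neg (by omega)]
      have : wsMax (pyWsIdx t) start start = none := by
        unfold wsMax
        rw [List.getLast?_eq_none_iff, List.filter_eq_nil_iff]
        intro y _ hy; simp at hy; omega
      rw [this]; rfl
-- the two per-iteration `end` computations agree
theorem end_eq (t : List Char) (start e : Int) (j : Nat)
    (hs : 0 ≤ start) (he : e < (t.length : Int))
    (hj : j ≤ (pyWsIdx t).length)
    (hpre : ∀ k (_h : k < (pyWsIdx t).length), k < j → (pyWsIdx t)[k] ≤ e) :
    (if start < pyBrkScan t start e then pyBrkScan t start e else e)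
      = (if 0 < pyAdvance (pyWsIdx t) e j ∧
            start < (pyWsIdx t).getD (pyAdvance (pyWsIdx t) e j - 1) 0
         then (pyWsIdx t).getD (pyAdvance (pyWsIdx t) e j - 1) 0 else e) := by
  set ws := pyWsIdx t with hws
  obtain ⟨hjJ, hJlen, hble, hnext⟩ := pyAdvance_spec ws e j hj hpre
  set J := pyAdvance ws e j with hJ
  have hpw := pairwise_pyWsIdx t
  have hmono : ∀ i k (hi : i < ws.length) (hk : k < ws.length), i ≤ k → ws[i] ≤ ws[k] := by
    intro i k hi hk hik
    rcases Nat.lt_or_ge i k with h | h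
    · exact le_of_lt (List.pairwise_iff_getElem.1 hpw i k hi hk h)
    · have : i = k := by omega
      subst this; rfl
  have hidx : ∀ k (hk : k < ws.length), ws[k] ≤ e → k < J := by
    intro k hk hke
    by_contra hkJ
    have hJlt : J < ws.length := by omega
    have := hmono J k hJlt hk (by omega)
    have := hnext hJlt
    omega
  rcases le_or_gt e start with hes | hse
  · -- e ≤ start: scan returns e immediately; B's candidate (if any) is ≤ e ≤ start
    have hscan : pyBrkScan t start e = e := by rw [pyBrkScan, dif_neg (by omega)]
    rw [hscan, if_neg (by omega), if_neg]
    rintro ⟨hJ0, hsw⟩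
    have hlt : J - 1 < ws.length := by omega
    rw [List.getD_eq_getElem ws 0 hlt] at hsw
    have := hble (J-1) hlt (by omega)
    omega
  · rw [pyBrkScan_eq t start e hs hse he]
    by_cases hJ0 : 0 < J
    · have hlt : J - 1 < ws.length := by omega
      have hwe : ws[J-1] ≤ e := hble (J-1) hlt (by omega)
      have hmax : ∀ y ∈ ws, y ≤ e → y ≤ ws[J-1] := by
        intro y hy hye
        obtain ⟨k, hk, rfl⟩ := List.mem_iff_getElem.1 hy
        exact hmono k (J-1) hk hlt (by have := hidx k hk hye; omega)
      rw [List.getD_eq_getElem ws 0 hlt]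
      by_cases hsw : start < ws[J-1]
      · have : wsMax ws start e = some ws[J-1] := by
          apply sorted_filter_getLast _ _ _ hpw (List.getElem_mem hlt) (by simp; omega)
          intro y hy hp
          simp at hp
          exact hmax y hy hp.2
        rw [← hws, this]
        simp only [Option.getD_some]
        rw [if_pos hsw, if_pos ⟨hJ0, hsw⟩]
      · have : wsMax ws start e = none := by
          unfold wsMax
          rw [List.getLast?_eq_none_iff, List.filter_eq_nil_iff]
          intro y hy hp
          simp at hp
          have := hmax y hy hp.2
          omega
        rw [← hws, this]
        simp only [Option.getD_none]
        rw [if_neg (by omega), if_neg (by tauto)]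
    · have : wsMax ws start e = none := by
        unfold wsMax
        rw [List.getLast?_eq_none_iff, List.filter_eq_nil_iff]
        intro y hy hp
        simp at hp
        obtain ⟨k, hk, rfl⟩ := List.mem_iff_getElem.1 hy
        have := hidx k hk hp.2
        omega
      rw [← hws, this]
      simp only [Option.getD_none]
      rw [if_neg (by omega), if_neg (by tauto)]
theorem loop_eq (t : List Char) (cs ov : Int) (hcs : 1 ≤ cs ∨ ov < cs) :
    ∀ (fuel : Nat) (start : Int) (j : Nat) (acc : List String),
    0 ≤ start → j ≤ (pyWsIdx t).length →
    (∀ k (_h : k < (pyWsIdx t).length), k < j → (pyWsIdx t)[k] ≤ start + cs) →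
    chunkLoopA t cs ov fuel start acc = chunkLoopB t (pyWsIdx t) cs ov fuel start j acc := by
  intro fuel
  induction fuel with
  | zero => intro start j acc _ _ _; rfl
  | succ fuel ih =>
    intro start j acc h0 hj hpre
    simp only [chunkLoopA, chunkLoopB]
    by_cases hlt : start < (t.length : Int)
    · rw [if_pos hlt, if_pos hlt]
      obtain ⟨hjJ, hJlen, hble, hnext⟩ := pyAdvance_spec (pyWsIdx t) (start + cs) j hj hpre
      set ws := pyWsIdx t with hws
      set J := pyAdvance ws (start + cs) j with hJdef
      -- the two `end` computations agree
      have hend :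
          (if start + cs < (t.length : Int) then
              (if start < pyBrkScan t start (start + cs) then pyBrkScan t start (start + cs)
               else start + cs)
            else start + cs)
          = (if start + cs < (t.length : Int) ∧ 0 < J ∧ start < ws.getD (J - 1) 0
             then ws.getD (J - 1) 0 else start + cs) := by
        by_cases hel : start + cs < (t.length : Int)
        · rw [if_pos hel, end_eq t start (start + cs) j h0 hel hj hpre]
          by_cases hc : 0 < J ∧ start < ws.getD (J - 1) 0
          · rw [if_pos hc, if_pos ⟨hel, hc.1, hc.2⟩]
          · rw [if_neg hc, if_neg (by tauto)]
        · rw [if_neg hel, if_neg (by tauto)]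
      rw [hend]
      set E := (if start + cs < (t.length : Int) ∧ 0 < J ∧ start < ws.getD (J - 1) 0
             then ws.getD (J - 1) 0 else start + cs) with hE
      -- start strictly increases
      have hEor : E = start + cs ∨ start < E := by
        rw [hE]; split
        · right; omega
        · left; rfl
      have hstep : start < (if ov < E - start then E - ov else E) := by
        rcases hEor with hE1 | hE2
        · rcases hcs with hc1 | hc2
          · split <;> omega
          · rw [if_pos (by omega)]; omega
        · split <;> omega
      apply ih
      · omega
      · exact hJlen
      · intro k hk hkJ
        have := hble k hk hkJ
        omega
    · rw [if_neg hlt, if_neg hlt]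
-- ===== VERDICT (by name: the statement is the Claim_ definition above) =====
theorem char_chunk_py_spec : Claim_equal_char_chunk_py := by
  intro text cs ov _hdom hpre
  unfold Spec_char_chunk_py char_chunk_py char_chunk_py_alt
  rcases hpre with h | h
  · subst h; rfl
  · exact loop_eq text.toList cs ov h _ 0 0 [] le_rfl (Nat.zero_le _)
      (by intro k _ hk; omega)
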